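-- pv_equiv track=rewrite | github.com/DrankedSnake/DSTAA | algorithms/searching/daikstra_search.py | find_lowest_costs
-- ===== SOURCE A (Python) =====
-- from typing import List
--
-- def find_lowest_costs(costs: dict, processed: List[str]):
--     low_value, low_key = (
--         float("inf"),
--         None,
--     )
--
--     for key, value in costs.items():
--         if value < low_value and key not in processed:
--             low_value = value
--             low_key = key
--
--     return low_key
-- ===== SOURCE B (Python) =====
-- from typing import List
--
--
-- def find_lowest_costs(costs: dict, processed: List[str]):
--     # Sort once by value (stable, so earliest-inserted wins ties),
--     # then return the first key not yet processed.
--     for key, _value in sorted(costs.items(), key=lambda kv: kv[1]):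
--         if key not in processed:
--             return key
--     return None
-- ===== Notes on version B (the rewrite author's own statement) =====
-- stated objective: alternative
-- what changed: Replaces the running-minimum scan with a stable sort by value followed by a first-match scan for an unprocessed key.
import Mathlib
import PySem

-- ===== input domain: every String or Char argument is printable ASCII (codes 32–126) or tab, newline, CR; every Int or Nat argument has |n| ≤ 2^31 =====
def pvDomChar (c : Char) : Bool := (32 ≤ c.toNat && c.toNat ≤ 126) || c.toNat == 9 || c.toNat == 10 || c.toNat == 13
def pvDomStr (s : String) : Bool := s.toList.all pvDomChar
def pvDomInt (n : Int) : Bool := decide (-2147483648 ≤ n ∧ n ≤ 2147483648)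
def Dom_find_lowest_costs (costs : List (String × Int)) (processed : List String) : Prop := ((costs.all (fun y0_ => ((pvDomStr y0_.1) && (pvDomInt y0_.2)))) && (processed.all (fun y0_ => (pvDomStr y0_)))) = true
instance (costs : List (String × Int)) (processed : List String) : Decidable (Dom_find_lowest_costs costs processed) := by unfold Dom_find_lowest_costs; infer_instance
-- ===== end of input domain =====

-- B replaces A's running-minimum scan with a stable sort by value followed by a first-unprocessed-match scan (alternative decomposition, same results).


-- ===== PORT A =====
-- state = (low_value, low_key); low_value = none plays float("inf") (every int is < it)
def find_lowest_costs (costs : List (String × Int)) (processed : List String) : Option String :=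
  (costs.foldl
    (fun (st : Option Int × Option String) kv =>
      if ((match st.1 with | none => true | some lv => decide (kv.2 < lv)) &&
          !(processed.contains kv.1))
      then (some kv.2, some kv.1) else st)
    ((none : Option Int), (none : Option String))).2

-- ===== PORT B =====
def find_lowest_costs_alt (costs : List (String × Int)) (processed : List String) : Option String :=
  (((PySem.List.sorted costs (fun kv => kv.2) false).find?
      (fun kv => !(processed.contains kv.1))).map (fun kv => kv.1))

-- ===== PRECONDITION & SPEC =====
def Spec_find_lowest_costs (costs : List (String × Int)) (processed : List String) (out : Option String) : Prop := out = find_lowest_costs_alt costs processed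
instance (costs : List (String × Int)) (processed : List String) (out : Option String) : Decidable (Spec_find_lowest_costs costs processed out) := by unfold Spec_find_lowest_costs; infer_instance

-- ===== CLAIM (what is proved, stated in full; the proofs are below) =====
def Claim_equal_find_lowest_costs : Prop := ∀ (costs : List (String × Int)) (processed : List String), Dom_find_lowest_costs costs processed → Spec_find_lowest_costs costs processed (find_lowest_costs costs processed)

-- ===== LEMMAS AND PROOFS =====

-- abbreviations used only by the proofs
def pvBefore (a b : String × Int) : Bool := decide (a.2 < b.2)

def pvIns (acc : List (String × Int)) (x : String × Int) : List (String × Int) :=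
  PySem.List.insertBy pvBefore x acc

theorem pvIns_nil (x : String × Int) : pvIns [] x = [x] := rfl

theorem pvIns_cons (x y : String × Int) (ys : List (String × Int)) :
    pvIns (y :: ys) x = if pvBefore x y then x :: y :: ys else y :: pvIns ys x := rfl

-- first-minimum fold (strictly smaller replaces; ties keep the earlier element)
def pvStep (m : Option (String × Int)) (x : String × Int) : Option (String × Int) :=
  match m with
  | none => some x
  | some p => if x.2 < p.2 then some x else some p

theorem pvInsertBy_front (x : String × Int) (zs : List (String × Int))
    (h : ∀ z ∈ zs, x.2 < z.2) : pvIns zs x = x :: zs := by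
  cases zs with
  | nil => rfl
  | cons z t =>
    rw [pvIns_cons, if_pos]
    simp only [pvBefore, decide_eq_true_eq]
    exact h z (by simp)

theorem pvPairwise_insertBy (x : String × Int) (ys : List (String × Int))
    (h : ys.Pairwise (fun a b => a.2 ≤ b.2)) :
    (pvIns ys x).Pairwise (fun a b => a.2 ≤ b.2) := by
  induction ys with
  | nil => simp [pvIns_nil]
  | cons y t ih =>
    rcases List.pairwise_cons.mp h with ⟨hy, ht⟩
    rw [pvIns_cons]
    by_cases hb : pvBefore x y = true
    · rw [if_pos hb]
      have hx : x.2 < y.2 := by simpa [pvBefore] using hb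
      refine List.pairwise_cons.mpr ⟨?_, h⟩
      intro z hz
      rcases List.mem_cons.mp hz with rfl | hz
      · omega
      · have := hy z hz; omega
    · rw [if_neg hb]
      have hx : ¬ x.2 < y.2 := by simpa [pvBefore] using hb
      refine List.pairwise_cons.mpr ⟨?_, ih ht⟩
      intro z hz
      rcases (PySem.List.mem_insertBy pvBefore x z t).mp hz with rfl | hz
      · omega
      · exact hy z hz

theorem pvFilter_insertBy (p : String × Int → Bool) (x : String × Int)
    (ys : List (String × Int)) (h : ys.Pairwise (fun a b => a.2 ≤ b.2)) :
    (pvIns ys x).filter p =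
      if p x then pvIns (ys.filter p) x else ys.filter p := by
  induction ys with
  | nil =>
    by_cases hp : p x = true <;>
      simp [pvIns_nil, List.filter_cons, hp]
  | cons y t ih =>
    rcases List.pairwise_cons.mp h with ⟨hy, ht⟩
    rw [pvIns_cons]
    by_cases hb : pvBefore x y = true
    · rw [if_pos hb]
      have hx : x.2 < y.2 := by simpa [pvBefore] using hb
      have hfront : pvIns ((y :: t).filter p) x = x :: (y :: t).filter p := by
        apply pvInsertBy_front
        intro z hz
        have hz' : z ∈ y :: t := List.mem_of_mem_filter hz
        rcases List.mem_cons.mp hz' with rfl | hz'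
        · omega
        · have := hy z hz'; omega
      by_cases hp : p x = true
      · rw [if_pos hp, hfront, List.filter_cons, if_pos hp]
      · rw [if_neg hp, List.filter_cons, if_neg hp]
    · rw [if_neg hb]
      have hx : ¬ x.2 < y.2 := by simpa [pvBefore] using hb
      by_cases hpy : p y = true
      · by_cases hp : p x = true
        · rw [if_pos hp, List.filter_cons, if_pos hpy, List.filter_cons, if_pos hpy,
            pvIns_cons, if_neg hb]
          rw [ih ht, if_pos hp]
        · rw [if_neg hp, List.filter_cons, if_pos hpy, List.filter_cons, if_pos hpy]
          rw [ih ht, if_neg hp]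
      · by_cases hp : p x = true
        · rw [if_pos hp, List.filter_cons, if_neg hpy, List.filter_cons, if_neg hpy]
          rw [ih ht, if_pos hp]
        · rw [if_neg hp, List.filter_cons, if_neg hpy, List.filter_cons, if_neg hpy]
          rw [ih ht, if_neg hp]

theorem pvFilter_foldl_ins (p : String × Int → Bool) (l acc : List (String × Int))
    (h : acc.Pairwise (fun a b => a.2 ≤ b.2)) :
    (l.foldl pvIns acc).filter p = (l.filter p).foldl pvIns (acc.filter p) := by
  induction l generalizing acc with
  | nil => rfl
  | cons x t ih =>
    rw [List.foldl_cons, ih (pvIns acc x) (pvPairwise_insertBy x acc h),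
      pvFilter_insertBy p x acc h, List.filter_cons]
    by_cases hp : p x = true
    · rw [if_pos hp, if_pos hp, List.foldl_cons]
    · rw [if_neg hp, if_neg hp]

theorem pvHead?_foldl_ins (l acc : List (String × Int)) :
    (l.foldl pvIns acc).head? = l.foldl pvStep acc.head? := by
  induction l generalizing acc with
  | nil => rfl
  | cons x t ih =>
    rw [List.foldl_cons, ih, List.foldl_cons]
    congr 1
    cases acc with
    | nil => rfl
    | cons y ys =>
      rw [pvIns_cons]
      by_cases hb : pvBefore x y = true
      · have hx : x.2 < y.2 := by simpa [pvBefore] using hb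
        rw [if_pos hb]
        simp [pvStep, hx]
      · have hx : ¬ x.2 < y.2 := by simpa [pvBefore] using hb
        rw [if_neg hb]
        simp [pvStep, hx]

-- proof-side names for A's step and its Option-state reformulation
def pvAstep (processed : List String) (st : Option Int × Option String)
    (kv : String × Int) : Option Int × Option String :=
  if ((match st.1 with | none => true | some lv => decide (kv.2 < lv)) &&
      !(processed.contains kv.1))
  then (some kv.2, some kv.1) else st

def pvStepM (processed : List String) (m : Option (String × Int))
    (x : String × Int) : Option (String × Int) :=
  if ((match m with | none => true | some p => decide (x.2 < p.2)) &&
      !(processed.contains x.1))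
  then some x else m

theorem pvAstep_eq (processed : List String) (m : Option (String × Int))
    (x : String × Int) :
    pvAstep processed (m.map (·.2), m.map (·.1)) x =
      ((pvStepM processed m x).map (·.2), (pvStepM processed m x).map (·.1)) := by
  cases m with
  | none =>
    unfold pvAstep pvStepM
    cases hc : processed.contains x.1 <;> simp [hc]
  | some q =>
    unfold pvAstep pvStepM
    cases hc : processed.contains x.1 <;>
      by_cases hx : x.2 < q.2 <;> simp only [hc, hx, Option.map_some, Option.map_none,
        decide_true, decide_false, Bool.not_true, Bool.not_false, Bool.and_true,
        Bool.and_false, Bool.false_eq_true, if_false, if_true, reduceIte]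

theorem pvFoldl_A (processed : List String) (l : List (String × Int))
    (m : Option (String × Int)) :
    l.foldl (pvAstep processed) (m.map (·.2), m.map (·.1)) =
      ((l.foldl (pvStepM processed) m).map (·.2),
       (l.foldl (pvStepM processed) m).map (·.1)) := by
  induction l generalizing m with
  | nil => rfl
  | cons x t ih =>
    rw [List.foldl_cons, pvAstep_eq, ih (pvStepM processed m x), List.foldl_cons]

theorem pvStepM_filter (processed : List String) (l : List (String × Int))
    (m : Option (String × Int)) :
    l.foldl (pvStepM processed) m =
      (l.filter (fun kv => !(processed.contains kv.1))).foldl pvStep m := by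
  induction l generalizing m with
  | nil => rfl
  | cons x t ih =>
    rw [List.foldl_cons, List.filter_cons]
    cases hc : processed.contains x.1 with
    | true =>
      have h1 : pvStepM processed m x = m := by
        unfold pvStepM; rw [hc]; cases m <;> simp
      rw [h1, ih m]
      simp
    | false =>
      have h1 : pvStepM processed m x = pvStep m x := by
        unfold pvStepM pvStep; rw [hc]
        cases m with
        | none => rfl
        | some q => by_cases hx : x.2 < q.2 <;> simp [hx]
      rw [h1, ih (pvStep m x)]
      simp

-- ===== VERDICT (by name: the statement is the Claim_ definition above) =====
theorem find_lowest_costs_spec : Claim_equal_find_lowest_costs := by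
  intro costs processed _
  show find_lowest_costs costs processed = find_lowest_costs_alt costs processed
  have hB :
      find_lowest_costs_alt costs processed =
        ((costs.filter (fun kv => !(processed.contains kv.1))).foldl pvStep none).map
          (fun x => x.1) := by
    unfold find_lowest_costs_alt
    rw [← List.head?_filter,
      PySem.List.sorted_eq_foldl_insertBy costs (fun kv => kv.2)]
    have h1 : (costs.foldl
        (fun acc x => PySem.List.insertBy (fun a b => decide (a.2 < b.2)) x acc)
        []) = costs.foldl pvIns [] := rfl
    rw [h1,
      pvFilter_foldl_ins (fun kv => !(processed.contains kv.1)) costs [] (by simp),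
      List.filter_nil,
      pvHead?_foldl_ins (costs.filter (fun kv => !(processed.contains kv.1))) []]
    rfl
  have hA : find_lowest_costs costs processed =
      (costs.foldl (pvAstep processed)
        ((none : Option (String × Int)).map (·.2),
         (none : Option (String × Int)).map (·.1))).2 := rfl
  rw [hB, hA]
  rw [pvFoldl_A processed costs none, pvStepM_filter processed costs none]
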